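-- pv_equiv track=rewrite | github.com/MrHamdulay/csc3-capstone | examples/data/Assignment_4/bdlren001/ndom.py | ndom_multiply
-- ===== SOURCE A (Python) =====
-- def ndom_multiply (a, b): # ndom multiply
--
--     answera=0
--
--     a=str(a)
--
--     exp=len(a)
--
--     for j in a:
--
--         exp=exp-1
--
--         j=int(j)
--
--         answera =answera+(j*(6**exp))
--
--     answerb=0
--
--     b=str(b)
--
--     exp=len(b)
--
--     for j in b:
--
--         exp=exp-1
--
--         j=int(j)
--
--         answerb =answerb+(j*(6**exp))
--
--     answer = answera *answerb
--
--     quotient=answer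
--
--     newanswer=""
--
--     while quotient !=0:
--
--         remainder = quotient%6
--
--         quotient =quotient//6
--
--         remainder=str(remainder)
--
--         newanswer+=remainder
--
--     return(newanswer[::-1])
-- ===== SOURCE B (Python) =====
-- def ndom_multiply(a, b):  # base-6 schoolbook long multiplication on digit arrays
--     dra = [int(c) for c in str(a)][::-1]   # little-endian face-value digits
--     drb = [int(c) for c in str(b)][::-1]
--     cells = [0] * (len(dra) + len(drb))
--     i = 0
--     for x in dra:
--         j = 0
--         for y in drb:
--             cells[i + j] += x * y
--             j += 1
--         i += 1
--     # propagate carries in base 6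
--     carry = 0
--     k = 0
--     for v in list(cells):
--         v += carry
--         cells[k] = v % 6
--         carry = v // 6
--         k += 1
--     while carry:
--         cells.append(carry % 6)
--         carry //= 6
--     while cells and cells[-1] == 0:
--         cells.pop()
--     return ''.join(str(d) for d in reversed(cells))
-- ===== Notes on version B (the rewrite author's own statement) =====
-- stated objective: alternative
-- what changed: B replaces A's pipeline (convert each argument to a big integer by summing digit*6**exp, multiply, then peel the product apart with repeated //6 and %6) by base-6 schoolbook long multiplication on little-endian digit arrays: a convolution cells[i+j] += x*y, one carry-propagation pass in base 6, trailing-zero strip, and a join of the reversed digits.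
-- outside the precondition, e.g. on ndom_multiply(-2, 3): A raises ValueError, B raises ValueError
import Mathlib
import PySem

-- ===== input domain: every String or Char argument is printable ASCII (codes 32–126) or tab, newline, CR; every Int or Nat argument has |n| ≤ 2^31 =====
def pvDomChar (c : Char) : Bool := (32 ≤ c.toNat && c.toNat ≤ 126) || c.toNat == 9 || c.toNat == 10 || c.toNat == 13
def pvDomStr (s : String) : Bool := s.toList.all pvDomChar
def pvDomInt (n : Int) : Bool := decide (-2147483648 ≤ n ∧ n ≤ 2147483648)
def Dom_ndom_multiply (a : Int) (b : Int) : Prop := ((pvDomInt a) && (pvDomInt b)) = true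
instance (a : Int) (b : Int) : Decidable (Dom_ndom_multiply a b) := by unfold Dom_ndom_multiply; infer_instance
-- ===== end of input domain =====

-- B replaces A's convert-to-integer-then-divide pipeline by base-6 schoolbook digit-array
-- multiplication with carry propagation (objective: alternative algorithm, similar cost).

-- ===== PORT A =====
-- int(j) on a single character of str(a); Pre_ admits only inputs on which this never raises
def ndomA_digit (c : Char) : Int := (PySem.Int.ofStr? (String.ofList [c])).getD 0

-- the 'for j in a: exp=exp-1; answera+=int(j)*6**exp' loop; exp starts at len(a) and is
-- decremented before use, so it stays ≥ 0 and Nat subtraction is exact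
def ndomA_parse : List Char → Nat → Int → Int
  | [], _, acc => acc
  | c :: cs, exp, acc => ndomA_parse cs (exp - 1) (acc + ndomA_digit c * (6 : Int) ^ (exp - 1))

-- the 'while quotient != 0' rendering loop; under Pre_ the product is ≥ 0, where Python's
-- // and % agree with Nat division, so the loop state is its toNat
def ndomA_render (q : Nat) (acc : List Char) : List Char :=
  if q = 0 then acc.reverse
  else ndomA_render (q / 6) (acc ++ PySem.Int.toChars (Int.ofNat (q % 6)))
decreasing_by exact Nat.div_lt_self (Nat.pos_of_ne_zero (by omega)) (by omega)

def ndom_multiply (a : Int) (b : Int) : String :=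
  let sa := PySem.Int.toChars a
  let answera := ndomA_parse sa sa.length 0
  let sb := PySem.Int.toChars b
  let answerb := ndomA_parse sb sb.length 0
  String.ofList (ndomA_render (answera * answerb).toNat [])

-- ===== PORT B =====
-- int(c); every value is ≥ 0, kept as a Nat (Python's // and % on these agree with Nat's)
def ndomB_digit (c : Char) : Nat := ((PySem.Int.ofStr? (String.ofList [c])).getD 0).toNat

-- inner 'for y in drb: cells[i+j] += x*y; j += 1'
def ndomB_inner (x i : Nat) : List Nat → List Nat → Nat → List Nat
  | [], cells, _ => cells
  | y :: ys, cells, j => ndomB_inner x i ys (cells.modify (i + j) (· + x * y)) (j + 1)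

-- outer 'for x in dra: …; i += 1'
def ndomB_outer (drb : List Nat) : List Nat → List Nat → Nat → List Nat
  | [], cells, _ => cells
  | x :: xs, cells, i => ndomB_outer drb xs (ndomB_inner x i drb cells 0) (i + 1)

-- 'for v in list(cells): v += carry; cells[k] = v % 6; carry = v // 6; k += 1'
def ndomB_carry : List Nat → Nat → List Nat × Nat
  | [], carry => ([], carry)
  | v :: rest, carry =>
      let w := v + carry
      let p := ndomB_carry rest (w / 6)
      (w % 6 :: p.1, p.2)

-- 'while carry: cells.append(carry % 6); carry //= 6'
def ndomB_carryTail (c : Nat) : List Nat :=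
  if c = 0 then [] else c % 6 :: ndomB_carryTail (c / 6)
decreasing_by exact Nat.div_lt_self (Nat.pos_of_ne_zero (by omega)) (by omega)

-- 'while cells and cells[-1] == 0: cells.pop()'
def ndomB_strip (ds : List Nat) : List Nat := (ds.reverse.dropWhile (· == 0)).reverse

def ndom_multiply_alt (a : Int) (b : Int) : String :=
  let dra := ((PySem.Int.toChars a).map ndomB_digit).reverse
  let drb := ((PySem.Int.toChars b).map ndomB_digit).reverse
  let cells := ndomB_outer drb dra (List.replicate (dra.length + drb.length) 0) 0
  let p := ndomB_carry cells 0
  let digits := ndomB_strip (p.1 ++ ndomB_carryTail p.2)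
  String.ofList (PySem.Chars.join [] (digits.reverse.map (fun d => PySem.Int.toChars (Int.ofNat d))))

-- ===== PRECONDITION & SPEC =====
-- Pre_ excludes negative arguments: str(-n) starts with '-', and int('-') raises ValueError
-- in both A and B (and on a negative product A's while loop would not terminate anyway).
def Pre_ndom_multiply (a : Int) (b : Int) : Prop := 0 ≤ a ∧ 0 ≤ b
instance (a : Int) (b : Int) : Decidable (Pre_ndom_multiply a b) := by
  unfold Pre_ndom_multiply; infer_instance
def pvWitness_ndom_multiply : Int × Int := (25, 13)

def Spec_ndom_multiply (a : Int) (b : Int) (out : String) : Prop := out = ndom_multiply_alt a b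
instance (a : Int) (b : Int) (out : String) : Decidable (Spec_ndom_multiply a b out) := by
  unfold Spec_ndom_multiply; infer_instance

-- ===== CLAIM (what is proved, stated in full; the proofs are below) =====
def Claim_equal_ndom_multiply : Prop := ∀ (a : Int) (b : Int), Dom_ndom_multiply a b → Pre_ndom_multiply a b → Spec_ndom_multiply a b (ndom_multiply a b)

-- ===== LEMMAS AND PROOFS =====

-- base-6 little-endian value of a digit list
def pvVal (l : List Nat) : Nat := l.foldr (fun d r => d + 6 * r) 0

theorem pvVal_nil : pvVal [] = 0 := rfl
theorem pvVal_cons (d : Nat) (l : List Nat) : pvVal (d :: l) = d + 6 * pvVal l := rfl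

theorem pvVal_append (l m : List Nat) : pvVal (l ++ m) = pvVal l + 6 ^ l.length * pvVal m := by
  induction l with
  | nil => simp [pvVal_nil]
  | cons d l ih => simp [pvVal_cons, ih, pow_succ]; ring

theorem pvVal_replicate (n : Nat) : pvVal (List.replicate n 0) = 0 := by
  induction n with
  | zero => rfl
  | succ n ih => simp [List.replicate_succ, pvVal_cons, ih]

-- digit chars of str(n) for n ≥ 0 parse to a nonnegative int
theorem pvDigit_nonneg {c : Char} (h : c.isDigit = true) : 0 ≤ ndomA_digit c := by
  have hb : 48 ≤ c.toNat ∧ c.toNat ≤ 57 := by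
    simp only [Char.isDigit, Bool.and_eq_true, decide_eq_true_eq] at h
    exact ⟨h.1, h.2⟩
  obtain ⟨h48, h57⟩ := hb
  rw [← Char.ofNat_toNat c]
  generalize c.toNat = n at h48 h57
  interval_cases n <;> decide

theorem pvDigit_toNat {c : Char} (h : c.isDigit = true) :
    ndomA_digit c = ((ndomB_digit c : Nat) : Int) := by
  have := pvDigit_nonneg h
  simp [ndomB_digit, ndomA_digit] at *
  omega

-- A's accumulation loop computes the value of the reversed digit list
theorem pvParse_eq (cs : List Char) (acc : Int) (h : ∀ c ∈ cs, c.isDigit = true) :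
    ndomA_parse cs cs.length acc = acc + ((pvVal ((cs.map ndomB_digit).reverse) : Nat) : Int) := by
  induction cs generalizing acc with
  | nil => simp [ndomA_parse, pvVal_nil]
  | cons c cs ih =>
    have hlen : (c :: cs).length - 1 = cs.length := by simp
    have hstep : ndomA_parse (c :: cs) (c :: cs).length acc
        = ndomA_parse cs cs.length (acc + ndomA_digit c * (6 : Int) ^ cs.length) := by
      simp [ndomA_parse]
    rw [hstep, ih _ (fun x hx => h x (List.mem_cons_of_mem _ hx))]
    have hd := pvDigit_toNat (h c (List.mem_cons_self))
    simp [pvVal_append, pvVal_cons, pvVal_nil, hd]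
    ring

-- A's rendering loop produces the reversed canonical little-endian digits
theorem pvToChars_digit (m : Nat) (h : m < 10) :
    PySem.Int.toChars (Int.ofNat m) = [Nat.digitChar m] := by
  simp [PySem.Int.toChars, Nat.toDigits_of_lt_base h]

theorem pvRender_eq (q : Nat) : ∀ acc : List Char,
    ndomA_render q acc = (acc ++ (ndomB_carryTail q).map Nat.digitChar).reverse := by
  induction q using Nat.strong_induction_on with
  | h q ih =>
    intro acc
    by_cases hq : q = 0
    · subst hq; simp [ndomA_render, ndomB_carryTail]
    · have hct : ndomB_carryTail q = q % 6 :: ndomB_carryTail (q / 6) := by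
        rw [ndomB_carryTail, if_neg hq]
      rw [ndomA_render, if_neg hq,
        ih (q / 6) (Nat.div_lt_self (Nat.pos_of_ne_zero hq) (by omega)), hct,
        pvToChars_digit (q % 6) (by omega)]
      simp

-- canonical digits: value, bound, no trailing zero
theorem pvCarryTail_val (c : Nat) : pvVal (ndomB_carryTail c) = c := by
  induction c using Nat.strong_induction_on with
  | h c ih =>
    by_cases hc : c = 0
    · subst hc; simp [ndomB_carryTail, pvVal_nil]
    · rw [ndomB_carryTail, if_neg hc, pvVal_cons,
        ih (c / 6) (Nat.div_lt_self (Nat.pos_of_ne_zero hc) (by omega))]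
      omega

theorem pvCarryTail_lt (c : Nat) : ∀ d ∈ ndomB_carryTail c, d < 6 := by
  induction c using Nat.strong_induction_on with
  | h c ih =>
    intro d hd
    by_cases hc : c = 0
    · subst hc; simp [ndomB_carryTail] at hd
    · rw [ndomB_carryTail, if_neg hc] at hd
      rcases List.mem_cons.mp hd with h | h
      · subst h; omega
      · exact ih (c / 6) (Nat.div_lt_self (Nat.pos_of_ne_zero hc) (by omega)) d h

theorem pvGetLast?_cons {l : List Nat} (d : Nat) (h : l ≠ []) :
    (d :: l).getLast? = l.getLast? := by
  cases l with
  | nil => exact absurd rfl h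
  | cons x xs => simp [List.getLast?_cons_cons]

theorem pvCarryTail_nil_iff (c : Nat) : ndomB_carryTail c = [] ↔ c = 0 := by
  constructor
  · intro h
    by_contra hc
    rw [ndomB_carryTail, if_neg hc] at h
    exact absurd h (by simp)
  · intro h; subst h; simp [ndomB_carryTail]

-- uniqueness of the canonical representation
theorem pvUniq : ∀ l : List Nat, (∀ d ∈ l, d < 6) → l.getLast? ≠ some 0 →
    l = ndomB_carryTail (pvVal l) := by
  intro l
  induction l with
  | nil => intro _ _; simp [pvVal_nil, ndomB_carryTail]
  | cons d ds ih =>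
    intro hlt hlast
    have hd6 : d < 6 := hlt d List.mem_cons_self
    rcases eq_or_ne ds [] with hds | hds
    · subst hds
      have hdne : d ≠ 0 := by
        simp [List.getLast?] at hlast; exact hlast
      rw [pvVal_cons, pvVal_nil]
      rw [ndomB_carryTail, if_neg (by omega)]
      congr 1
      · omega
      · rw [(pvCarryTail_nil_iff _).mpr (by omega)]
    · have hlast' : ds.getLast? ≠ some 0 := by
        rwa [pvGetLast?_cons _ hds] at hlast
      have hds_eq := ih (fun x hx => hlt x (List.mem_cons_of_mem _ hx)) hlast'
      have hvne : pvVal ds ≠ 0 := by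
        intro h0
        rw [h0, (pvCarryTail_nil_iff 0).mpr rfl] at hds_eq
        exact hds hds_eq
      rw [pvVal_cons]
      rw [ndomB_carryTail, if_neg (by omega)]
      have h1 : (d + 6 * pvVal ds) % 6 = d := by omega
      have h2 : (d + 6 * pvVal ds) / 6 = pvVal ds := by omega
      rw [h1, h2, ← hds_eq]

-- the modify step
theorem pvVal_modify (l : List Nat) : ∀ (k m : Nat), k < l.length →
    pvVal (l.modify k (· + m)) = pvVal l + m * 6 ^ k := by
  induction l with
  | nil => intro k m h; simp at h
  | cons d ds ih =>
    intro k m h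
    cases k with
    | zero => simp [List.modify, pvVal_cons]; ring
    | succ k =>
      simp only [List.modify_succ_cons, pvVal_cons, ih k m (by simpa using h), pow_succ]
      ring

-- inner loop invariant
theorem pvInner (x i : Nat) : ∀ (ys cells : List Nat) (j : Nat),
    i + j + ys.length ≤ cells.length →
    (ndomB_inner x i ys cells j).length = cells.length ∧
      pvVal (ndomB_inner x i ys cells j) = pvVal cells + x * pvVal ys * 6 ^ (i + j) := by
  intro ys
  induction ys with
  | nil => intro cells j h; simp [ndomB_inner, pvVal_nil]
  | cons y ys ih =>
    intro cells j h
    simp only [List.length_cons] at h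
    have hk : i + j < cells.length := by omega
    have hlen : (cells.modify (i + j) (· + x * y)).length = cells.length := by
      simp
    obtain ⟨L, V⟩ := ih (cells.modify (i + j) (· + x * y)) (j + 1) (by omega)
    refine ⟨by rw [ndomB_inner, L, hlen], ?_⟩
    rw [ndomB_inner, V, pvVal_modify _ _ _ hk, pvVal_cons]
    have : i + (j + 1) = (i + j) + 1 := by omega
    rw [this, pow_succ]
    ring

-- outer loop invariant
theorem pvOuter (drb : List Nat) : ∀ (xs cells : List Nat) (i : Nat),
    i + xs.length + drb.length ≤ cells.length →
    (ndomB_outer drb xs cells i).length = cells.length ∧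
      pvVal (ndomB_outer drb xs cells i) = pvVal cells + pvVal xs * pvVal drb * 6 ^ i := by
  intro xs
  induction xs with
  | nil => intro cells i h; simp [ndomB_outer, pvVal_nil]
  | cons x xs ih =>
    intro cells i h
    simp only [List.length_cons] at h
    obtain ⟨L1, V1⟩ := pvInner x i drb cells 0 (by omega)
    obtain ⟨L2, V2⟩ := ih (ndomB_inner x i drb cells 0) (i + 1) (by omega)
    refine ⟨by rw [ndomB_outer, L2, L1], ?_⟩
    rw [ndomB_outer, V2, V1, pvVal_cons, pow_succ]
    ring

-- carry pass invariant
theorem pvCarry : ∀ (l : List Nat) (carry : Nat),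
    (ndomB_carry l carry).1.length = l.length ∧
      (∀ d ∈ (ndomB_carry l carry).1, d < 6) ∧
      pvVal (ndomB_carry l carry).1 + (ndomB_carry l carry).2 * 6 ^ l.length
        = pvVal l + carry := by
  intro l
  induction l with
  | nil => intro carry; simp [ndomB_carry, pvVal_nil]
  | cons v rest ih =>
    intro carry
    obtain ⟨L, B, V⟩ := ih ((v + carry) / 6)
    refine ⟨by simp [ndomB_carry, L], ?_, ?_⟩
    · intro d hd
      simp only [ndomB_carry] at hd
      rcases List.mem_cons.mp hd with h | h
      · subst h; omega
      · exact B d h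
    · simp only [ndomB_carry, pvVal_cons, List.length_cons, pow_succ]
      have := Nat.mod_add_div (v + carry) 6
      nlinarith [V]

-- strip preserves the value and leaves no trailing zero
theorem pvStrip_val (ds : List Nat) : pvVal (ndomB_strip ds) = pvVal ds := by
  unfold ndomB_strip
  rw [← List.reverse_reverse ds]
  generalize ds.reverse = rds
  rw [List.reverse_reverse]
  induction rds with
  | nil => simp
  | cons r rds ih =>
    by_cases hr : r = 0
    · subst hr
      simp only [List.dropWhile_cons, beq_self_eq_true, List.reverse_cons,
        pvVal_append]
      simpa [pvVal_cons, pvVal_nil] using ih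
    · simp [hr]

theorem pvStrip_last_aux : ∀ l : List Nat, (l.dropWhile (· == 0)).head? ≠ some 0
  | [] => by simp
  | r :: l => by
    by_cases hr : r = 0
    · subst hr; simpa using pvStrip_last_aux l
    · simp [hr]

theorem pvStrip_last (ds : List Nat) : (ndomB_strip ds).getLast? ≠ some 0 := by
  unfold ndomB_strip
  rw [List.getLast?_reverse]
  exact pvStrip_last_aux _

theorem pvStrip_sub (ds : List Nat) : ∀ d ∈ ndomB_strip ds, d ∈ ds := by
  intro d hd
  unfold ndomB_strip at hd
  have := List.dropWhile_sublist (p := (· == 0)) (l := ds.reverse)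
  have hmem : d ∈ ds.reverse := this.subset (by simpa using hd)
  simpa using hmem

-- chars of str(n) for 0 ≤ n are digits
theorem pvToChars_isDigit {n : Int} (hn : 0 ≤ n) : ∀ c ∈ PySem.Int.toChars n, c.isDigit = true := by
  intro c hc
  unfold PySem.Int.toChars at hc
  rw [if_neg (by omega)] at hc
  exact Nat.isDigit_of_mem_toDigits (by omega) (by omega) hc

-- B's full digit pipeline yields the canonical digits of the product
theorem pvB_digits (dra drb : List Nat) :
    ndomB_strip ((ndomB_carry (ndomB_outer drb dra
        (List.replicate (dra.length + drb.length) 0) 0) 0).1 ++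
      ndomB_carryTail (ndomB_carry (ndomB_outer drb dra
        (List.replicate (dra.length + drb.length) 0) 0) 0).2)
      = ndomB_carryTail (pvVal dra * pvVal drb) := by
  obtain ⟨L0, V0⟩ := pvOuter drb dra (List.replicate (dra.length + drb.length) 0) 0
    (by simp)
  set cells := ndomB_outer drb dra (List.replicate (dra.length + drb.length) 0) 0 with hcells
  obtain ⟨L1, B1, V1⟩ := pvCarry cells 0
  set p := ndomB_carry cells 0 with hp
  have hclen : cells.length = dra.length + drb.length := by
    rw [L0]; simp
  have hvc : pvVal cells = pvVal dra * pvVal drb := by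
    rw [V0, pvVal_replicate]; ring
  rw [hclen] at V1
  have hval : pvVal (p.1 ++ ndomB_carryTail p.2) = pvVal dra * pvVal drb := by
    rw [pvVal_append, pvCarryTail_val, L1, hclen]
    have h0 : (0 : Nat) = 0 := rfl
    nlinarith [V1, hvc]
  have hlt : ∀ d ∈ p.1 ++ ndomB_carryTail p.2, d < 6 := by
    intro d hd
    rcases List.mem_append.mp hd with h | h
    · exact B1 d h
    · exact pvCarryTail_lt _ d h
  have := pvUniq (ndomB_strip (p.1 ++ ndomB_carryTail p.2))
    (fun d hd => hlt d (pvStrip_sub _ d hd)) (pvStrip_last _)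
  rw [pvStrip_val, hval] at this
  exact this

-- reassembling the output strings
theorem pvJoin_digits (ds : List Nat) (h : ∀ d ∈ ds, d < 10) :
    PySem.Chars.join [] (ds.map (fun d => PySem.Int.toChars (Int.ofNat d)))
      = ds.map Nat.digitChar := by
  have h1 : ds.map (fun d => PySem.Int.toChars (Int.ofNat d))
      = ds.map (fun d => [Nat.digitChar d]) :=
    List.map_congr_left (fun d hd => pvToChars_digit d (h d hd))
  have h2 : ds.map (fun d => [Nat.digitChar d])
      = (ds.map Nat.digitChar).map (fun c => [c]) := by
    rw [List.map_map]; rfl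
  rw [h1, h2, PySem.Chars.join_nil_singletons]

-- ===== VERDICT (by name: the statement is the Claim_ definition above) =====
theorem ndom_multiply_spec : Claim_equal_ndom_multiply := by
  intro a b _ hpre
  obtain ⟨ha, hb⟩ := hpre
  show ndom_multiply a b = ndom_multiply_alt a b
  simp only [ndom_multiply, ndom_multiply_alt]
  have hda := pvToChars_isDigit ha
  have hdb := pvToChars_isDigit hb
  set dra := ((PySem.Int.toChars a).map ndomB_digit).reverse with hdra
  set drb := ((PySem.Int.toChars b).map ndomB_digit).reverse with hdrb
  have hpa := pvParse_eq (PySem.Int.toChars a) 0 hda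
  have hpb := pvParse_eq (PySem.Int.toChars b) 0 hdb
  rw [hpa, hpb]
  have hN : ((0 + ((pvVal dra : Nat) : Int)) * (0 + ((pvVal drb : Nat) : Int))).toNat
      = pvVal dra * pvVal drb := by
    rw [zero_add, zero_add, ← Int.natCast_mul, Int.toNat_natCast]
  rw [hN, pvRender_eq]
  have hBD := pvB_digits dra drb
  have hlen : dra.length + drb.length
      = (((PySem.Int.toChars a).map ndomB_digit).reverse).length
        + (((PySem.Int.toChars b).map ndomB_digit).reverse).length := rfl
  rw [hBD]
  rw [pvJoin_digits _ (fun d hd => by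
    have := pvCarryTail_lt (pvVal dra * pvVal drb) d (List.mem_reverse.mp hd)
    omega)]
  simp
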